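-- pv_equiv track=rewrite | github.com/aver1001/Problem-Solving | 풀이 완료/8895/acmicpc_2.py | solution
-- ===== SOURCE A (Python) =====
-- def factorial(num):
--     answer = 1
--     for i in range (2,num+1):
--         answer *= i
--     return answer
--
-- def solution(n:int,l:int,r:int)-> int:
--     #TODO 불가능한 조건은 다시좀 생각해보자.
--         #N+1-L 보다 작고
--     #첫 막대는 그냥 설치한다.
--     n -= 1
--     l -= 1
--     r -= 1
--     answer = 1
--
--     flag = False
--     while (True):
--         if l == r == 0:
--             break
--         #양쪽다 설치가 가능할 경우
--         if l >= 1 and r >= 1: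
--             answer *= n
--             l -= 1
--             r -= 1
--
--         #한쪽만 설치가 가능할 경우
--         else:
--             if l >= 1:
--                 l -= 1
--             else:
--                 r -= 1
--             flag = True
--
--         n -= 1
--
--     if flag == False:
--         return 0
--     return answer * factorial(n)
-- ===== SOURCE B (Python) =====
-- def solution(n: int, l: int, r: int) -> int:
--     if l == r:
--         return 0
--     m = n - 1
--     mn = min(l, r) - 1
--     mx = max(l, r) - 1
--     ans = 1
--     for k in range(mn):
--         ans *= m - k
--     f = 1
--     for i in range(2, m - mx + 1):
--         f *= i
--     return ans * f
-- ===== Notes on version B (the rewrite author's own statement) =====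
-- stated objective: simpler
-- what changed: Replaces the stateful while-loop simulation (mutating n, l, r, answer, flag) with a direct formulation: return 0 when l == r, otherwise a descending product of min(l,r)-1 factors times a plain range-based factorial of n-max(l,r).
import Mathlib
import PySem

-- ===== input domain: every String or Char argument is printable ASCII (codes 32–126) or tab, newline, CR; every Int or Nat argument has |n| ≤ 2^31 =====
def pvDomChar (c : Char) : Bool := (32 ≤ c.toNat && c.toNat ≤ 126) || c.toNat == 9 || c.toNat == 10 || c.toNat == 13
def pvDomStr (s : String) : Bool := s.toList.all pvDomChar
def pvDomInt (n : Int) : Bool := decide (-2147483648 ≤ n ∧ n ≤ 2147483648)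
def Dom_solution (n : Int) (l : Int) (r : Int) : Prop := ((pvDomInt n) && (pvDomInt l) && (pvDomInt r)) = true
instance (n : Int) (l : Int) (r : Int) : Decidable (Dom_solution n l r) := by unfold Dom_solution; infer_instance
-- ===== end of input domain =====

-- B replaces A's stateful while-loop with a direct descending-product formulation (objective: simpler).

-- ===== PORT A =====
-- A's helper `factorial`: answer = 1; for i in range(2, num+1): answer *= i
def factorialA (num : Int) : Int :=
  (PySem.List.pyRange 2 (num + 1) 1).foldl (fun a i => a * i) 1

-- A's `while True` loop over state (n, l, r, answer, flag); fuel only makes it total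
-- (inside Pre_ the fuel supplied below is never exhausted; running out returns the state,
-- which coincides with the `break` result only when the break fires).
def solLoopA : Nat → Int → Int → Int → Int → Bool → Int × Int × Int × Int × Bool
  | 0, n, l, r, answer, flag => (n, l, r, answer, flag)
  | fuel + 1, n, l, r, answer, flag =>
    if l = 0 ∧ r = 0 then (n, l, r, answer, flag)
    else if 1 ≤ l ∧ 1 ≤ r then solLoopA fuel (n - 1) (l - 1) (r - 1) (answer * n) flag
    else if 1 ≤ l then solLoopA fuel (n - 1) (l - 1) r answer true
    else solLoopA fuel (n - 1) l (r - 1) answer true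

def solution (n : Int) (l : Int) (r : Int) : Int :=
  let n1 := n - 1
  let l1 := l - 1
  let r1 := r - 1
  let res := solLoopA ((l1 + r1).toNat + 1) n1 l1 r1 1 false
  if res.2.2.2.2 = false then 0 else res.2.2.2.1 * factorialA res.1

-- ===== PORT B =====
def solution_alt (n : Int) (l : Int) (r : Int) : Int :=
  if l = r then 0
  else
    let m := n - 1
    let mn := min l r - 1
    let mx := max l r - 1
    let ans := (List.range mn.toNat).foldl (fun (a : Int) (k : Nat) => a * (m - (k : Int))) 1
    let f := (PySem.List.pyRange 2 (m - mx + 1) 1).foldl (fun a i => a * i) 1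
    ans * f

-- ===== PRECONDITION & SPEC =====
-- Pre_ excludes exactly the inputs on which A never returns: when min(l,r) < 1 (other
-- than the immediate break) the loop decrements one side below zero and never reaches
-- l == r == 0, so A loops forever there.
def Pre_solution (n : Int) (l : Int) (r : Int) : Prop := 1 ≤ l ∧ 1 ≤ r
instance (n : Int) (l : Int) (r : Int) : Decidable (Pre_solution n l r) := by unfold Pre_solution; infer_instance
def pvWitness_solution : Int × Int × Int := (5, 2, 3)

def Spec_solution (n : Int) (l : Int) (r : Int) (out : Int) : Prop := out = solution_alt n l r
instance (n : Int) (l : Int) (r : Int) (out : Int) : Decidable (Spec_solution n l r out) := by unfold Spec_solution; infer_instance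

-- ===== CLAIM (what is proved, stated in full; the proofs are below) =====
def Claim_equal_solution : Prop := ∀ (n : Int) (l : Int) (r : Int), Dom_solution n l r → Pre_solution n l r → Spec_solution n l r (solution n l r)

-- ===== LEMMAS AND PROOFS =====

-- descending product n·(n-1)·…·(n-j+1), the invariant value built by phase 1 of A's loop
def descProd (n : Int) : Nat → Int
  | 0 => 1
  | j + 1 => n * descProd (n - 1) j

theorem descProd_succ_back (j : Nat) : ∀ (n : Int), descProd n (j + 1) = descProd n j * (n - j) := by
  induction j with
  | zero => intro n; simp [descProd]
  | succ j ih =>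
    intro n
    rw [show descProd n (j + 1 + 1) = n * descProd (n - 1) (j + 1) from rfl, ih (n - 1),
        show descProd n (j + 1) = n * descProd (n - 1) j from rfl]
    push_cast; ring

theorem foldl_descProd (j : Nat) : ∀ (n acc : Int),
    (List.range j).foldl (fun (a : Int) (k : Nat) => a * (n - (k : Int))) acc = acc * descProd n j := by
  induction j with
  | zero => intro n acc; simp [descProd]
  | succ j ih =>
    intro n acc
    rw [List.range_succ, List.foldl_append, ih, descProd_succ_back]
    simp only [List.foldl_cons, List.foldl_nil]
    ring

theorem solLoopA_zero (f : Nat) (n ans : Int) (flag : Bool) :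
    solLoopA f n 0 0 ans flag = (n, 0, 0, ans, flag) := by
  cases f <;> simp [solLoopA]

-- phase 1: while both sides are positive, the loop multiplies the descending product
theorem solLoopA_phase1 (j : Nat) : ∀ (f : Nat) (n a b ans : Int) (flag : Bool),
    0 ≤ a → 0 ≤ b →
    solLoopA (f + j) n (a + j) (b + j) ans flag
      = solLoopA f (n - j) a b (ans * descProd n j) flag := by
  induction j with
  | zero => intro f n a b ans flag _ _; simp [descProd]
  | succ j ih =>
    intro f n a b ans flag ha hb
    have hf : f + (j + 1) = (f + j) + 1 := by omega
    rw [hf, solLoopA]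
    split_ifs with h1 h2 h3
    · exfalso; obtain ⟨h1a, _⟩ := h1; push_cast at h1a; omega
    · have e1 : a + ((j + 1 : Nat) : Int) - 1 = a + j := by push_cast; ring
      have e2 : b + ((j + 1 : Nat) : Int) - 1 = b + j := by push_cast; ring
      rw [e1, e2, ih f (n - 1) a b (ans * n) flag ha hb]
      have e3 : n - 1 - (j : Int) = n - ((j + 1 : Nat) : Int) := by push_cast; ring
      have e4 : ans * n * descProd (n - 1) j = ans * descProd n (j + 1) := by
        rw [show descProd n (j + 1) = n * descProd (n - 1) j from rfl]; ring
      rw [e3, e4]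
    · exfalso; apply h2; constructor <;> · push_cast; omega
    · exfalso; apply h2; constructor <;> · push_cast; omega

-- phase 2, right side remaining: l = 0, r = d+1 > 0
theorem solLoopA_phase2R (d : Nat) : ∀ (f : Nat) (n r ans : Int) (flag : Bool),
    r = (d : Int) + 1 →
    solLoopA (f + (d + 1)) n 0 r ans flag = (n - r, 0, 0, ans, true) := by
  induction d with
  | zero =>
    intro f n r ans flag hr; subst hr
    rw [show f + (0 + 1) = f + 1 from by omega, solLoopA]
    norm_num
    exact solLoopA_zero f (n - 1) ans true
  | succ d ih =>
    intro f n r ans flag hr; subst hr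
    rw [show f + (d + 1 + 1) = (f + (d + 1)) + 1 from by omega, solLoopA]
    split_ifs with h1 h2 h3
    · exfalso; obtain ⟨_, h1b⟩ := h1; push_cast at h1b; omega
    · exfalso; exact absurd h2.1 (by omega)
    · exfalso; omega
    · have e : ((d + 1 : Nat) : Int) + 1 - 1 = (d : Int) + 1 := by push_cast; ring
      rw [e, ih f (n - 1) _ ans true rfl]
      have e2 : n - 1 - ((d : Int) + 1) = n - (((d + 1 : Nat) : Int) + 1) := by push_cast; ring
      rw [e2]

-- phase 2, left side remaining: l = d+1 > 0, r = 0
theorem solLoopA_phase2L (d : Nat) : ∀ (f : Nat) (n l ans : Int) (flag : Bool),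
    l = (d : Int) + 1 →
    solLoopA (f + (d + 1)) n l 0 ans flag = (n - l, 0, 0, ans, true) := by
  induction d with
  | zero =>
    intro f n l ans flag hl; subst hl
    rw [show f + (0 + 1) = f + 1 from by omega, solLoopA]
    norm_num
    exact solLoopA_zero f (n - 1) ans true
  | succ d ih =>
    intro f n l ans flag hl; subst hl
    rw [show f + (d + 1 + 1) = (f + (d + 1)) + 1 from by omega, solLoopA]
    split_ifs with h1 h2 h3
    · exfalso; obtain ⟨h1a, _⟩ := h1; push_cast at h1a; omega
    · exfalso; exact absurd h2.2 (by omega)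
    · have e : ((d + 1 : Nat) : Int) + 1 - 1 = (d : Int) + 1 := by push_cast; ring
      rw [e, ih f (n - 1) _ ans true rfl]
      have e2 : n - 1 - ((d : Int) + 1) = n - (((d + 1 : Nat) : Int) + 1) := by push_cast; ring
      rw [e2]
    · exfalso; push_cast at h3; omega

-- ===== VERDICT (by name: the statement is the Claim_ definition above) =====
theorem solution_spec : Claim_equal_solution := by
  intro n l r _ hpre
  obtain ⟨hl, hr⟩ := hpre
  unfold Spec_solution solution solution_alt
  dsimp only
  rcases lt_trichotomy l r with hlr | hlr | hlr
  · -- l < r : phase 1 then phase 2 on the right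
    rw [if_neg (ne_of_lt hlr), min_eq_left (le_of_lt hlr), max_eq_right (le_of_lt hlr)]
    set j := ((l : Int) - 1).toNat with hjdef
    have hj : ((j : Int)) = l - 1 := Int.toNat_of_nonneg (by omega)
    set d' := ((r : Int) - l - 1).toNat with hddef
    have hd : ((d' : Int)) = r - l - 1 := Int.toNat_of_nonneg (by omega)
    obtain ⟨f0, hf0⟩ : ∃ f0, (((l : Int) - 1) + (r - 1)).toNat + 1 = (f0 + (d' + 1)) + j :=
      ⟨(((l : Int) - 1) + (r - 1)).toNat + 1 - ((d' + 1) + j), by omega⟩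
    have h1 := solLoopA_phase1 j (f0 + (d' + 1)) (n - 1) 0 (r - l) 1 false (le_refl 0) (by omega)
    have h2 := solLoopA_phase2R d' f0 (n - 1 - (j : Int)) (r - l) (1 * descProd (n - 1) j) false (by omega)
    rw [hf0, show ((l : Int) - 1) = 0 + (j : Int) from by omega,
        show ((r : Int) - 1) = (r - l) + (j : Int) from by omega, h1, h2]
    norm_num
    rw [foldl_descProd]
    norm_num
    refine Or.inl ?_
    rw [show n - 1 - (j : Int) - (r - l) = n - 1 - ((r - l) + (j : Int)) from by omega]
    rfl
  · -- l = r : the loop exits with flag = false, both sides return 0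
    subst hlr
    rw [if_pos rfl]
    set j := ((l : Int) - 1).toNat with hjdef
    have hj : ((j : Int)) = l - 1 := Int.toNat_of_nonneg (by omega)
    obtain ⟨f0, hf0⟩ : ∃ f0, (((l : Int) - 1) + ((l : Int) - 1)).toNat + 1 = f0 + j :=
      ⟨(((l : Int) - 1) + ((l : Int) - 1)).toNat + 1 - j, by omega⟩
    have h1 := solLoopA_phase1 j f0 (n - 1) 0 0 1 false (le_refl 0) (le_refl 0)
    rw [hf0, show ((l : Int) - 1) = 0 + (j : Int) from by omega, h1, solLoopA_zero]
    norm_num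
  · -- r < l : phase 1 then phase 2 on the left
    rw [if_neg (ne_of_gt hlr), min_eq_right (le_of_lt hlr), max_eq_left (le_of_lt hlr)]
    set j := ((r : Int) - 1).toNat with hjdef
    have hj : ((j : Int)) = r - 1 := Int.toNat_of_nonneg (by omega)
    set d' := ((l : Int) - r - 1).toNat with hddef
    have hd : ((d' : Int)) = l - r - 1 := Int.toNat_of_nonneg (by omega)
    obtain ⟨f0, hf0⟩ : ∃ f0, (((l : Int) - 1) + (r - 1)).toNat + 1 = (f0 + (d' + 1)) + j :=
      ⟨(((l : Int) - 1) + (r - 1)).toNat + 1 - ((d' + 1) + j), by omega⟩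
    have h1 := solLoopA_phase1 j (f0 + (d' + 1)) (n - 1) (l - r) 0 1 false (by omega) (le_refl 0)
    have h2 := solLoopA_phase2L d' f0 (n - 1 - (j : Int)) (l - r) (1 * descProd (n - 1) j) false (by omega)
    rw [hf0, show ((r : Int) - 1) = 0 + (j : Int) from by omega,
        show ((l : Int) - 1) = (l - r) + (j : Int) from by omega, h1, h2]
    norm_num
    rw [foldl_descProd]
    norm_num
    refine Or.inl ?_
    rw [show n - 1 - (j : Int) - (l - r) = n - 1 - ((l - r) + (j : Int)) from by omega]
    rfl
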